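-- pv_equiv track=rewrite | github.com/JaceyPenny/pyspark-friend-recommendation | friend-recommendation.py | friend_ownership_to_connection
-- ===== SOURCE A (Python) =====
-- import itertools
--
-- def friend_ownership_to_connection(f_o):
--     """
--     Maps a "friend ownership" structure (see the above method) to an array of connections.
--
--     For example, the value ``(0, [1, 2, 3])`` will get mapped to::
--
--         [
--             ((0,1), 0),
--             ((0,2), 0),
--             ((0,3), 0),
--             ((1,2), 1),
--             ((1,3), 1),
--             ((2,3), 1)
--         ]
--
--     Essentially, the friend ownership structure is converted a list of all connection information embedded in the
--     structure. For example, users 0 and 1 are already connected, so that connection is represented by ``((0,1), 0)``.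
--     The final ``0`` indicates that these users are currently friends.
--
--     As another example, the structure encodes the fact that users 1 and 2 have a mutual friend (in this case, the mutual
--     friend is friend 0). So, the resulting connection is represented by ``((1,2), 1)``, where the ``1`` indicates that
--     these users share a single mutual friend.
--
--     Finally, it is important to note that the "key" in each of these elements (namely the ``(user_id_0, user_id_1)``
--     pair) is deterministically ordered. It is important for each unique pair of users to be grouped in the same way,
--     so the bi-directional relationship must be retained by ordering the tuple by userId (or any other deterministic
--     ordering. Simple "greater-than" comparison just happens to be the fastest).
--
--     :param f_o: the friendship ownership object
--     :return: List[Tuple[Tuple[int, int], int]] the embedded connections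
--     """
--     user_id = f_o[0]
--     friends = f_o[1]
--
--     connections = []
--
--     for friend_id in friends:
--         key = (user_id, friend_id)
--         if user_id > friend_id:
--             key = (friend_id, user_id)
--
--         connections.append(
--             (key, 0)
--         )
--
--     for friend_pair in itertools.combinations(friends, 2):
--         friend_0 = friend_pair[0]
--         friend_1 = friend_pair[1]
--
--         key = (friend_0, friend_1)
--         if friend_0 > friend_1:
--             key = (friend_1, friend_0)
--         connections.append(
--             (key, 1)
--         )
--
--     return connections
-- ===== SOURCE B (Python) =====
-- def friend_ownership_to_connection(f_o):
--     # single pass over successive suffixes of [owner]+friends: pair the current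
--     # head with every later id; tag is 0 only on the first (owner) iteration
--     ids = [f_o[0]] + list(f_o[1])
--     out = []
--     tag = 0
--     while len(ids) >= 2:
--         head, ids = ids[0], ids[1:]
--         for r in ids:
--             out.append((tuple(sorted((head, r))), tag))
--         tag = 1
--     return out
-- ===== Notes on version B (the rewrite author's own statement) =====
-- stated objective: alternative
-- what changed: B replaces A's two staged loops (owner-friend loop, then itertools.combinations over friends) by one while-loop over successive suffixes of [owner]+friends with an output accumulator, pairing each head with its tail and threading a tag that is 0 only on the first iteration, using tuple(sorted(...)) instead of a comparison branch.
import Mathlib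
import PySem

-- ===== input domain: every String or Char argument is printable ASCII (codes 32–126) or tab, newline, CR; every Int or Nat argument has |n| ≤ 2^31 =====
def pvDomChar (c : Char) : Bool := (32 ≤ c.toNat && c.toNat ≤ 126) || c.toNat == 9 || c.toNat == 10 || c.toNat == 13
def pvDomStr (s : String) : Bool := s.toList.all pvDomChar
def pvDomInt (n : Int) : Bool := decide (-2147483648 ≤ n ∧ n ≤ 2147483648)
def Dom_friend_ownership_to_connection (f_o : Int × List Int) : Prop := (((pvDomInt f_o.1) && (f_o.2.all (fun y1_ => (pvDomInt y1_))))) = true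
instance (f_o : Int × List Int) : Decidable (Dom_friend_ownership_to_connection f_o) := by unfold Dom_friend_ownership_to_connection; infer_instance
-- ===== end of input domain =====

-- B replaces A's two staged loops by one while-loop over successive suffixes of
-- [owner]+friends with an output accumulator and a threaded tag (0 only on the
-- first iteration); an alternative decomposition of the same cost, not claimed faster.

-- ===== PORT A =====
-- itertools.combinations(l, 2), in the same (lexicographic-by-position) order
def combs2 {α : Type} : List α → List (α × α)
  | [] => []
  | x :: xs => xs.map (fun y => (x, y)) ++ combs2 xs

def friend_ownership_to_connection (f_o : Int × List Int) : List ((Int × Int) × Int) :=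
  let user_id := f_o.1
  let friends := f_o.2
  let connections : List ((Int × Int) × Int) :=
    friends.foldl (fun acc friend_id =>
      acc ++ [((if user_id > friend_id then (friend_id, user_id) else (user_id, friend_id)), (0 : Int))]) []
  (combs2 friends).foldl (fun acc fp =>
      acc ++ [((if fp.1 > fp.2 then (fp.2, fp.1) else (fp.1, fp.2)), (1 : Int))]) connections

-- ===== PORT B =====
-- the while loop, as tail recursion over its state (out, ids, tag); one step pairs the
-- head with every later id. tuple(sorted((a, b))) on two ints is exactly this conditional swap
def goB : List ((Int × Int) × Int) → List Int → Int → List ((Int × Int) × Int)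
  | out, [], _ => out
  | out, [_], _ => out
  | out, head :: r :: rest, tag =>
      goB (out ++ (r :: rest).map (fun y => ((if head ≤ y then (head, y) else (y, head)), tag)))
        (r :: rest) 1

def friend_ownership_to_connection_alt (f_o : Int × List Int) : List ((Int × Int) × Int) :=
  goB [] (f_o.1 :: f_o.2) 0

-- ===== PRECONDITION & SPEC =====
def Spec_friend_ownership_to_connection (f_o : Int × List Int) (out : List ((Int × Int) × Int)) : Prop := out = friend_ownership_to_connection_alt f_o
instance (f_o : Int × List Int) (out : List ((Int × Int) × Int)) : Decidable (Spec_friend_ownership_to_connection f_o out) := by unfold Spec_friend_ownership_to_connection; infer_instance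

-- ===== CLAIM (what is proved, stated in full; the proofs are below) =====
def Claim_equal_friend_ownership_to_connection : Prop := ∀ (f_o : Int × List Int), Dom_friend_ownership_to_connection f_o → Spec_friend_ownership_to_connection f_o (friend_ownership_to_connection f_o)

-- ===== LEMMAS AND PROOFS =====

theorem foldl_app_map {α β : Type} (f : α → β) :
    ∀ (l : List α) (acc : List β), l.foldl (fun a x => a ++ [f x]) acc = acc ++ l.map f := by
  intro l
  induction l with
  | nil => simp
  | cons x xs ih => intro acc; simp [List.foldl, ih]

theorem key_comm (a b : Int) :
    (if a > b then (b, a) else (a, b)) = (if a ≤ b then (a, b) else (b, a)) := by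
  split_ifs <;> first | rfl | omega

-- goB with tag 1 is exactly the tagged key-normalised combinations list
theorem goB_one :
    ∀ (l : List Int) (out : List ((Int × Int) × Int)),
      goB out l 1 = out ++ (combs2 l).map (fun p => ((if p.1 ≤ p.2 then (p.1, p.2) else (p.2, p.1)), (1 : Int))) := by
  intro l
  induction l with
  | nil => simp [goB, combs2]
  | cons x xs ih =>
    cases xs with
    | nil => simp [goB, combs2]
    | cons y ys => intro out; simp [goB, combs2, ih, Function.comp]

-- ===== VERDICT (by name: the statement is the Claim_ definition above) =====
theorem friend_ownership_to_connection_spec : Claim_equal_friend_ownership_to_connection := by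
  intro f_o _
  obtain ⟨u, fr⟩ := f_o
  show _ = _
  cases fr with
  | nil => rfl
  | cons f fs =>
    simp only [friend_ownership_to_connection, friend_ownership_to_connection_alt,
      foldl_app_map, List.nil_append, goB, goB_one]
    refine congrArg₂ (· ++ ·) ?_ ?_ <;>
      exact List.map_congr_left (fun x _ => by rw [key_comm])
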